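-- pv_equiv track=rewrite | github.com/Kawser-nerd/CLCDSA | Source Codes/CodeJamData/15/21/8.py | f
-- ===== SOURCE A (Python) =====
-- def f(n):
--     if n == 1:
--         return 1
--
--     if str(n)[-1] == "0":
--         # Multiples of 10
--         return 1 + f(n-1)
--
--     s = str(n)
--     k = int("1" + (len(s) - 1) * "0")
--
--     a = -k # No reverse
--     b = 0 # Reverse
--
--     for i in range(len(s)):
--         a += int(s[~i]) * 10**i
--         b += int(s[~i]) * 10**min(i, len(s)-i-1)
--
--     return min(a, b) + f(k)
-- ===== SOURCE B (Python) =====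
-- def f(n):
--     # Iterative, pure-arithmetic version: no strings, explicit accumulator loop.
--     total = 1
--     while n != 1:
--         if n % 10 == 0:
--             total += 1
--             n -= 1
--         else:
--             # k = largest power of 10 not exceeding n; L = number of digits
--             k, L = 1, 1
--             while k * 10 <= n:
--                 k *= 10
--                 L += 1
--             # b = sum of digit_i * 10**min(i, L-1-i)  (digit_i = i-th digit from the right)
--             b, m, i = 0, n, 0
--             while m:
--                 e = i if i < L - 1 - i else L - 1 - i
--                 b += (m % 10) * 10 ** e
--                 m //= 10
--                 i += 1
--             total += min(n - k, b)
--             n = k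
--     return total
-- ===== Notes on version B (the rewrite author's own statement) =====
-- stated objective: alternative
-- what changed: Replaces A's string-based recursion (str/int round-trips per digit and a recursive call per phase) by an iterative while-loop with a running total that derives the power-of-ten threshold and the per-digit sum purely arithmetically (%, //), with no string conversions and no recursion.
-- outside the precondition, e.g. on f(0): A raises ValueError, B does not finish within the time limit
import Mathlib
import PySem

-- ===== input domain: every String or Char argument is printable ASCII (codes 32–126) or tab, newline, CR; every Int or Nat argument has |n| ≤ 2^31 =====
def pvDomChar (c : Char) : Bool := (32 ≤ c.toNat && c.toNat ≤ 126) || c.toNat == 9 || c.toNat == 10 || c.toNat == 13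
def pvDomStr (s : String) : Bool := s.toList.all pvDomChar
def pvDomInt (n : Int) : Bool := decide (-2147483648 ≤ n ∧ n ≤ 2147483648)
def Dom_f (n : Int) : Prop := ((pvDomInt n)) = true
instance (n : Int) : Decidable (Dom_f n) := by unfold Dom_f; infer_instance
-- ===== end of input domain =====

-- B replaces A's string-and-recursion scheme by an iterative accumulator loop on pure
-- integer arithmetic (no str/int round-trips); objective: alternative decomposition.

-- ===== PORT A =====
-- Fuel-based transcription of A's recursion (fuel only makes it total; it never runs out
-- when n ≥ 1, i.e. inside Pre_f).  `.getD 0` stands where Python's int()/indexing would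
-- raise — unreachable for n ≥ 1.
def fGo : Nat → Int → Int
  | 0, _ => 0
  | fuel + 1, n =>
    if n = 1 then 1
    else
      let s : List Char := PySem.Int.toChars n
      if PySem.List.pyGet? s (-1) = some '0' then
        1 + fGo fuel (n - 1)
      else
        let k : Int := (PySem.Int.ofChars? ('1' :: List.replicate (s.length - 1) '0')).getD 0
        let ab : Int × Int :=
          (List.range s.length).foldl
            (fun (ab : Int × Int) (i : Nat) =>
              let d : Int :=
                ((PySem.List.pyGet? s (-(i : Int) - 1)).bind
                  (fun c => PySem.Int.ofChars? [c])).getD 0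
              (ab.1 + d * 10 ^ i, ab.2 + d * 10 ^ min i (s.length - i - 1)))
            (-k, 0)
        min ab.1 ab.2 + fGo fuel k

def f (n : Int) : Int := fGo (n.toNat + 1) n

-- ===== PORT B =====
-- inner `while k * 10 <= n` loop of Source B
def altKL : Nat → Int → Int → Nat → Int × Nat
  | 0, _, k, L => (k, L)
  | fuel + 1, n, k, L => if k * 10 ≤ n then altKL fuel n (k * 10) (L + 1) else (k, L)

-- inner `while m:` digit loop of Source B
def altB : Nat → Nat → Int → Int → Nat → Int
  | 0, _, b, _, _ => b
  | fuel + 1, L, b, m, i =>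
    if m = 0 then b
    else
      let e : Nat := if i < L - 1 - i then i else L - 1 - i
      altB fuel L (b + PySem.Int.mod m 10 * 10 ^ e) (PySem.Int.floordiv m 10) (i + 1)

-- outer `while n != 1` loop of Source B (fuel = totality guard, never exhausted for n ≥ 1)
def altGo : Nat → Int → Int → Int
  | 0, _, total => total
  | fuel + 1, n, total =>
    if n = 1 then total
    else if PySem.Int.mod n 10 = 0 then altGo fuel (n - 1) (total + 1)
    else
      let kL := altKL (fuel + 1) n 1 1
      let b := altB (n.toNat + 1) kL.2 0 n 0
      altGo fuel kL.1 (total + min (n - kL.1) b)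

def f_alt (n : Int) : Int := altGo (n.toNat + 1) n 1

-- ===== PRECONDITION & SPEC =====
-- Pre_f excludes exactly n ≤ 0, where Python A raises (ValueError on int('-') or
-- unbounded recursion → RecursionError); it never returns there.
def Pre_f (n : Int) : Prop := 1 ≤ n
instance (n : Int) : Decidable (Pre_f n) := by unfold Pre_f; infer_instance
def pvWitness_f : Int := 5

def Spec_f (n : Int) (out : Int) : Prop := out = f_alt n
instance (n : Int) (out : Int) : Decidable (Spec_f n out) := by unfold Spec_f; infer_instance

-- ===== CLAIM (what is proved, stated in full; the proofs are below) =====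
def Claim_equal_f : Prop := ∀ (n : Int), Dom_f n → Pre_f n → Spec_f n (f n)

-- ===== LEMMAS AND PROOFS =====

-- digit string of m (= Nat.toDigits 10 m) in structurally convenient form
def rep (m : Nat) : List Char :=
  if m < 10 then [Nat.digitChar m]
  else rep (m / 10) ++ [Nat.digitChar (m % 10)]
decreasing_by exact Nat.div_lt_self (by omega) (by omega)

-- the value Source B's digit loop accumulates, as a recursion on m
def bSpec (L i m : Nat) : Int :=
  if m = 0 then 0
  else ((m % 10 : Nat) : Int) * 10 ^ min i (L - i - 1) + bSpec L (i + 1) (m / 10)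
decreasing_by exact Nat.div_lt_self (by omega) (by omega)

-- i-th decimal digit of m, from the right
def dig (m i : Nat) : Int := ((m / 10 ^ i % 10 : Nat) : Int)

theorem toDigitsCore_eq_rep : ∀ (m : Nat), ∀ (fuel : Nat) (acc : List Char),
    m < fuel → Nat.toDigitsCore 10 fuel m acc = rep m ++ acc := by
  intro m
  induction m using Nat.strong_induction_on with
  | _ m ih =>
    intro fuel acc hf
    obtain ⟨fuel, rfl⟩ : ∃ f', fuel = f' + 1 := ⟨fuel - 1, by omega⟩
    rw [Nat.toDigitsCore]
    by_cases h10 : m < 10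
    · have hdiv : m / 10 = 0 := Nat.div_eq_of_lt h10
      rw [if_pos hdiv, rep, if_pos h10, Nat.mod_eq_of_lt h10]
      simp
    · have hdiv : ¬ m / 10 = 0 := by
        have : 0 < m / 10 := Nat.div_pos (by omega) (by omega)
        omega
      rw [if_neg hdiv,
        ih (m / 10) (Nat.div_lt_self (by omega) (by omega)) fuel _
          (by have := Nat.div_lt_self (show 0 < m by omega) (show 1 < 10 by omega); omega)]
      conv_rhs => rw [rep, if_neg h10]
      simp

theorem toChars_eq_rep (n : Int) (h : 1 ≤ n) :
    PySem.Int.toChars n = rep n.toNat := by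
  have h0 : ¬ n < 0 := by omega
  simp [PySem.Int.toChars, h0, Nat.toDigits,
    toDigitsCore_eq_rep n.toNat (n.toNat + 1) [] (by omega)]

theorem rep_length (m : Nat) : (rep m).length = Nat.log 10 m + 1 := by
  induction m using Nat.strong_induction_on with
  | _ m ih =>
    rw [rep]
    by_cases h10 : m < 10
    · have h0 : Nat.log 10 m = 0 := Nat.log_eq_zero_iff.mpr (Or.inl h10)
      simp [h10, h0]
    · have hlog : 0 < Nat.log 10 m := Nat.log_pos (by omega) (by omega)
      have hdb := Nat.log_div_base 10 m
      simp [h10, ih (m / 10) (Nat.div_lt_self (by omega) (by omega))]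
      omega

theorem rep_getElem? (m : Nat) : ∀ i, i < (rep m).length →
    (rep m)[(rep m).length - 1 - i]? = some (Nat.digitChar (m / 10 ^ i % 10)) := by
  induction m using Nat.strong_induction_on with
  | _ m ih =>
    intro i hi
    by_cases h10 : m < 10
    · rw [rep, if_pos h10] at hi ⊢
      have : i = 0 := by simpa using hi
      subst this
      simp [Nat.mod_eq_of_lt h10]
    · rw [rep, if_neg h10] at hi ⊢
      cases i with
      | zero =>
        rw [show (rep (m/10) ++ [(m % 10).digitChar]).length - 1 - 0
              = (rep (m/10)).length by simp]
        rw [List.getElem?_append_right le_rfl]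
        simp
      | succ j =>
        have hj : j < (rep (m/10)).length := by simp at hi; omega
        rw [show (rep (m/10) ++ [(m % 10).digitChar]).length - 1 - (j+1)
              = (rep (m/10)).length - 1 - j by simp; omega]
        rw [List.getElem?_append_left (by omega)]
        rw [ih (m/10) (Nat.div_lt_self (by omega) (by omega)) j hj]
        congr 2
        rw [Nat.div_div_eq_div_mul, ← pow_succ']

theorem digitChar_eq_zero_iff (r : Nat) (h : r < 10) :
    Nat.digitChar r = '0' ↔ r = 0 := by
  interval_cases r <;> simp <;> decide

theorem ofChars?_digitChar (r : Nat) (h : r < 10) :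
    PySem.Int.ofChars? [Nat.digitChar r] = some (r : Int) := by
  interval_cases r <;> decide

theorem ofChars?_one_zeros (j : Nat) (h : j ≤ 9) :
    PySem.Int.ofChars? ('1' :: List.replicate j '0') = some ((10 : Int) ^ j) := by
  interval_cases j <;> decide

theorem foldl_pair_add (g h : Nat → Int) : ∀ (L : Nat) (a0 b0 : Int),
    (List.range L).foldl (fun ab i => (ab.1 + g i, ab.2 + h i)) (a0, b0)
      = (a0 + ((List.range L).map g).sum, b0 + ((List.range L).map h).sum) := by
  intro L
  induction L with
  | zero => simp
  | succ L ih =>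
    intro a0 b0
    rw [List.range_succ]
    simp [List.foldl_append, ih, add_assoc]

theorem dig_succ (m j : Nat) : dig m (j + 1) = dig (m / 10) j := by
  unfold dig
  rw [Nat.div_div_eq_div_mul, ← pow_succ']

theorem sum_dig_pow (m : Nat) : 1 ≤ m →
    ((List.range (Nat.log 10 m + 1)).map (fun j => dig m j * 10 ^ j)).sum = (m : Int) := by
  induction m using Nat.strong_induction_on with
  | _ m ih =>
    intro hm
    by_cases h10 : m < 10
    · have h0 : Nat.log 10 m = 0 := Nat.log_eq_zero_iff.mpr (Or.inl h10)
      simp [h0, dig]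
      omega
    · have hdb : Nat.log 10 m = Nat.log 10 (m/10) + 1 := by
        have h1 := Nat.log_div_base 10 m
        have h2 : 0 < Nat.log 10 m := Nat.log_pos (by omega) (by omega)
        omega
      rw [hdb, List.range_succ_eq_map]
      simp only [List.map_cons, List.map_map, List.sum_cons]
      have hcomp : ((fun j => dig m j * 10 ^ j) ∘ Nat.succ)
          = fun j => 10 * (dig (m/10) j * 10 ^ j) := by
        funext j
        simp only [Function.comp_apply, dig_succ, pow_succ]
        ring
      rw [hcomp, List.sum_map_mul_left,
        ih (m/10) (Nat.div_lt_self (by omega) (by omega)) (by omega)]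
      have hdm := Nat.div_add_mod m 10
      simp only [dig, pow_zero, Nat.div_one, mul_one]
      push_cast
      omega

theorem sum_dig_min (L : Nat) : ∀ (m : Nat), 1 ≤ m → ∀ (i : Nat),
    ((List.range (Nat.log 10 m + 1)).map
        (fun j => dig m j * 10 ^ min (i + j) (L - (i + j) - 1))).sum = bSpec L i m := by
  intro m
  induction m using Nat.strong_induction_on with
  | _ m ih =>
    intro hm i
    by_cases h10 : m < 10
    · have h0 : Nat.log 10 m = 0 := Nat.log_eq_zero_iff.mpr (Or.inl h10)
      have hd : m / 10 = 0 := Nat.div_eq_of_lt h10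
      rw [bSpec, if_neg (by omega), bSpec, hd, if_pos rfl]
      simp [h0, dig]
    · have hdb : Nat.log 10 m = Nat.log 10 (m/10) + 1 := by
        have h1 := Nat.log_div_base 10 m
        have h2 : 0 < Nat.log 10 m := Nat.log_pos (by omega) (by omega)
        omega
      rw [hdb, List.range_succ_eq_map]
      simp only [List.map_cons, List.map_map, List.sum_cons]
      have hcomp : ((fun j => dig m j * 10 ^ min (i + j) (L - (i + j) - 1)) ∘ Nat.succ)
          = fun j => dig (m/10) j * 10 ^ min ((i+1) + j) (L - ((i+1) + j) - 1) := by
        funext j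
        have h2 : i + (j + 1) = (i + 1) + j := by omega
        simp only [Function.comp_apply, dig_succ, Nat.succ_eq_add_one, h2]
      rw [hcomp, ih (m/10) (Nat.div_lt_self (by omega) (by omega)) (by omega) (i+1)]
      conv_rhs => rw [bSpec]
      rw [if_neg (show ¬ m = 0 by omega)]
      simp [dig]

theorem altKL_spec (n : Int) (hn : 1 ≤ n) : ∀ (fuel j : Nat),
    10 ^ j ≤ n.toNat → Nat.log 10 n.toNat ≤ j + fuel →
    altKL fuel n ((10 : Int) ^ j) (j + 1)
      = ((10 : Int) ^ Nat.log 10 n.toNat, Nat.log 10 n.toNat + 1) := by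
  intro fuel
  induction fuel with
  | zero =>
    intro j h1 h2
    have hj : j ≤ Nat.log 10 n.toNat := (Nat.le_log_iff_pow_le (by omega) (by omega)).mpr h1
    have hje : j = Nat.log 10 n.toNat := by omega
    rw [altKL, hje]
  | succ fuel ih =>
    intro j h1 h2
    have hmn : ((n.toNat : Nat) : Int) = n := Int.toNat_of_nonneg (by omega)
    rw [altKL]
    by_cases hc : (10:Int)^j * 10 ≤ n
    · rw [if_pos hc]
      have h1' : 10 ^ (j+1) ≤ n.toNat := by
        have hx : ((10 ^ (j+1) : Nat) : Int) ≤ n := by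
          push_cast
          calc ((10:Int) ^ (j+1)) = (10:Int)^j * 10 := by ring
          _ ≤ n := hc
        omega
      have := ih (j+1) h1' (by omega)
      rw [show (10:Int)^j * 10 = (10:Int)^(j+1) from (pow_succ 10 j).symm]
      exact this
    · rw [if_neg hc]
      have hlt : n.toNat < 10^(j+1) := by
        by_contra hle
        apply hc
        have hx : ((10 ^ (j+1) : Nat) : Int) ≤ n := by omega
        calc (10:Int)^j * 10 = (10:Int)^(j+1) := by ring
        _ = ((10 ^ (j+1) : Nat) : Int) := by push_cast; ring
        _ ≤ n := hx
      have hj2 : Nat.log 10 n.toNat < j+1 := by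
        by_contra hle
        have : 10^(j+1) ≤ n.toNat :=
          (Nat.le_log_iff_pow_le (by omega) (by omega)).mp (by omega)
        omega
      have hj : j ≤ Nat.log 10 n.toNat := (Nat.le_log_iff_pow_le (by omega) (by omega)).mpr h1
      have hje : j = Nat.log 10 n.toNat := by omega
      rw [hje]

theorem altB_spec : ∀ (m : Nat) (fuel : Nat), m < fuel → ∀ (L : Nat) (b : Int) (i : Nat),
    altB fuel L b (m : Int) i = b + bSpec L i m := by
  intro m
  induction m using Nat.strong_induction_on with
  | _ m ih =>
    intro fuel hf L b i
    obtain ⟨fuel, rfl⟩ : ∃ f', fuel = f' + 1 := ⟨fuel - 1, by omega⟩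
    by_cases hm : m = 0
    · subst hm
      rw [bSpec]
      simp [altB]
    · have hmod : PySem.Int.mod ((m : Nat) : Int) 10 = ((m % 10 : Nat) : Int) := by
        rw [PySem.Int.mod_eq_emod_of_pos (by norm_num)]
        omega
      have hdivi : PySem.Int.floordiv ((m : Nat) : Int) 10 = ((m / 10 : Nat) : Int) := by
        rw [PySem.Int.floordiv_eq_ediv_of_pos (by norm_num)]
        omega
      have he : (if i < L - 1 - i then i else L - 1 - i) = min i (L - i - 1) := by
        split_ifs <;> omega
      simp only [altB, if_neg (show ¬ ((m : Nat) : Int) = 0 by exact_mod_cast hm),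
        hmod, hdivi, he]
      rw [ih (m/10) (Nat.div_lt_self (by omega) (by omega)) fuel
        (by have := Nat.div_lt_self (show 0 < m by omega) (show 1 < 10 by omega); omega)
        L _ (i+1)]
      conv_rhs => rw [bSpec]
      rw [if_neg hm]
      ring

theorem rep_last (m : Nat) : PySem.List.pyGet? (rep m) (-1) = some (Nat.digitChar (m % 10)) := by
  rw [PySem.List.pyGet?_neg_one, List.getLast?_eq_getElem?]
  have hlen : 0 < (rep m).length := by rw [rep_length]; omega
  have h := rep_getElem? m 0 (by omega)
  simpa using h

theorem fGo_step0 (n : Int) (fuel : Nat) (h1 : 1 ≤ n) (hne : n ≠ 1)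
    (hd : n.toNat % 10 = 0) : fGo (fuel + 1) n = 1 + fGo fuel (n - 1) := by
  have hs := toChars_eq_rep n h1
  have hc : PySem.List.pyGet? (PySem.Int.toChars n) (-1) = some '0' := by
    rw [hs, rep_last, hd]
    decide
  simp only [fGo, if_neg hne, hc, if_pos]

theorem fGo_step (n : Int) (fuel : Nat) (h1 : 1 ≤ n) (hne : n ≠ 1)
    (h31 : n ≤ 2147483648) (hd : n.toNat % 10 ≠ 0) :
    fGo (fuel + 1) n
      = min (n - (10 : Int) ^ Nat.log 10 n.toNat)
            (bSpec (Nat.log 10 n.toNat + 1) 0 n.toNat)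
          + fGo fuel ((10 : Int) ^ Nat.log 10 n.toNat) := by
  have hmn : ((n.toNat : Nat) : Int) = n := Int.toNat_of_nonneg (by omega)
  have hm1 : 1 ≤ n.toNat := by omega
  have hs := toChars_eq_rep n h1
  have hlen : (PySem.Int.toChars n).length = Nat.log 10 n.toNat + 1 := by
    rw [hs, rep_length]
  have hc : ¬ (PySem.List.pyGet? (PySem.Int.toChars n) (-1) = some '0') := by
    rw [hs, rep_last]
    intro hcontra
    exact hd ((digitChar_eq_zero_iff (n.toNat % 10) (Nat.mod_lt _ (by omega))).mp
      (Option.some.inj hcontra))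
  have hg9 : Nat.log 10 n.toNat ≤ 9 := by
    by_contra hgt
    have hx : 10 ^ 10 ≤ n.toNat :=
      (Nat.le_log_iff_pow_le (by omega) (by omega)).mp (by omega)
    have hpow : (10:Nat) ^ 10 = 10000000000 := by norm_num
    omega
  have hdterm : ∀ i, i < Nat.log 10 n.toNat + 1 →
      ((PySem.List.pyGet? (PySem.Int.toChars n) (-(i : Int) - 1)).bind
          (fun c => PySem.Int.ofChars? [c])).getD 0 = dig n.toNat i := by
    intro i hi
    have hidx : (-(i : Int) - 1) = -(((i+1 : Nat)) : Int) := by push_cast; ring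
    rw [hs, hidx, PySem.List.pyGet?_neg_natCast _ _ (by omega) (by rw [rep_length]; omega)]
    rw [show (rep n.toNat).length - (i+1) = (rep n.toNat).length - 1 - i by omega]
    rw [rep_getElem? n.toNat i (by rw [rep_length]; omega)]
    simp [ofChars?_digitChar _ (Nat.mod_lt _ (by omega)), dig]
  have hfold :
      (List.range (Nat.log 10 n.toNat + 1)).foldl
        (fun (ab : Int × Int) (i : Nat) =>
          let d : Int := ((PySem.List.pyGet? (PySem.Int.toChars n) (-(i : Int) - 1)).bind
              (fun c => PySem.Int.ofChars? [c])).getD 0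
          (ab.1 + d * 10 ^ i,
           ab.2 + d * 10 ^ min i (Nat.log 10 n.toNat + 1 - i - 1)))
        (-((10:Int)^Nat.log 10 n.toNat), 0)
      = (-((10:Int)^Nat.log 10 n.toNat) + ((n.toNat : Nat) : Int),
         0 + bSpec (Nat.log 10 n.toNat + 1) 0 n.toNat) := by
    rw [PySem.List.foldl_congr_mem _ _
        (fun (ab : Int × Int) (i : Nat) =>
          (ab.1 + dig n.toNat i * 10 ^ i,
           ab.2 + dig n.toNat i * 10 ^ min i (Nat.log 10 n.toNat + 1 - i - 1))) _
        (by
          intro acc i hmem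
          have hi : i < Nat.log 10 n.toNat + 1 := List.mem_range.mp hmem
          simp only [hdterm i hi])]
    have hsum := sum_dig_pow n.toNat hm1
    have hb := sum_dig_min (Nat.log 10 n.toNat + 1) n.toNat hm1 0
    simp only [Nat.zero_add] at hb
    rw [foldl_pair_add, hsum, hb]
  simp only [fGo]
  rw [if_neg hne, if_neg hc]
  simp only [hlen]
  rw [show Nat.log 10 n.toNat + 1 - 1 = Nat.log 10 n.toNat from by omega,
    ofChars?_one_zeros (Nat.log 10 n.toNat) hg9]
  simp only [Option.getD_some]
  rw [hfold]
  rw [show -((10:Int)^Nat.log 10 n.toNat) + ((n.toNat : Nat) : Int)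
        = n - (10:Int)^Nat.log 10 n.toNat from by rw [hmn]; ring,
    zero_add]

theorem main_loop : ∀ (N : Nat) (n : Int) (fuel1 fuel2 : Nat) (total : Int),
    n.toNat ≤ N → 1 ≤ n → n ≤ 2147483648 → n.toNat < fuel1 → n.toNat < fuel2 →
    altGo fuel2 n total = total + fGo fuel1 n - 1 := by
  intro N
  induction N with
  | zero => intro n fuel1 fuel2 total hN h1 _ _ _; omega
  | succ N ih =>
    intro n fuel1 fuel2 total hN h1 h31 hf1 hf2
    obtain ⟨f1, rfl⟩ : ∃ x, fuel1 = x + 1 := ⟨fuel1 - 1, by omega⟩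
    obtain ⟨f2, rfl⟩ : ∃ x, fuel2 = x + 1 := ⟨fuel2 - 1, by omega⟩
    by_cases hone : n = 1
    · subst hone
      simp [altGo, fGo]
    · have hmod_iff : PySem.Int.mod n 10 = 0 ↔ n.toNat % 10 = 0 := by
        rw [PySem.Int.mod_eq_emod_of_pos (by norm_num)]
        omega
      by_cases hdv : n.toNat % 10 = 0
      · simp only [altGo, if_neg hone, if_pos (hmod_iff.mpr hdv)]
        rw [fGo_step0 n f1 h1 hone hdv]
        rw [ih (n-1) f1 f2 (total+1) (by omega) (by omega) (by omega) (by omega) (by omega)]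
        ring
      · have hm1 : 1 ≤ n.toNat := by omega
        have hmn : ((n.toNat : Nat) : Int) = n := Int.toNat_of_nonneg (by omega)
        have hkm : 10 ^ Nat.log 10 n.toNat ≤ n.toNat := Nat.pow_log_le_self 10 (by omega)
        have hkm' : 10 ^ Nat.log 10 n.toNat < n.toNat := by
          rcases Nat.lt_or_ge (10 ^ Nat.log 10 n.toNat) n.toNat with hlt | hge
          · exact hlt
          · exfalso
            have heq : 10 ^ Nat.log 10 n.toNat = n.toNat := by omega
            rcases Nat.eq_zero_or_pos (Nat.log 10 n.toNat) with hg0 | hgp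
            · rw [hg0, pow_zero] at heq
              exact hone (by omega)
            · have hdvd : 10 ∣ n.toNat := heq ▸ dvd_pow_self 10 (by omega)
              exact hdv (by omega)
        have hpowcast : ((10:Int)^Nat.log 10 n.toNat)
            = ((10^Nat.log 10 n.toNat : Nat) : Int) := by push_cast; ring
        have hpowtoNat : ((10:Int)^Nat.log 10 n.toNat).toNat = 10^Nat.log 10 n.toNat := by
          rw [hpowcast]; exact Int.toNat_natCast _
        have hKL1 : (altKL (f2 + 1) n 1 1).1 = (10:Int)^Nat.log 10 n.toNat := by
          have hglef : Nat.log 10 n.toNat ≤ 0 + (f2 + 1) := by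
            have := Nat.log_le_self 10 n.toNat
            omega
          have h := altKL_spec n h1 (f2+1) 0 (by simpa using hm1) hglef
          simp only [pow_zero] at h
          rw [h]
        have hKL2 : (altKL (f2 + 1) n 1 1).2 = Nat.log 10 n.toNat + 1 := by
          have hglef : Nat.log 10 n.toNat ≤ 0 + (f2 + 1) := by
            have := Nat.log_le_self 10 n.toNat
            omega
          have h := altKL_spec n h1 (f2+1) 0 (by simpa using hm1) hglef
          simp only [pow_zero] at h
          rw [h]
        have hB : altB (n.toNat + 1) (Nat.log 10 n.toNat + 1) 0 n 0
            = bSpec (Nat.log 10 n.toNat + 1) 0 n.toNat := by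
          have h := altB_spec n.toNat (n.toNat+1) (by omega) (Nat.log 10 n.toNat + 1) 0 0
          rw [hmn] at h
          simpa using h
        simp only [altGo, if_neg hone, if_neg (fun hx => hdv (hmod_iff.mp hx))]
        rw [hKL1, hKL2, hB]
        rw [fGo_step n f1 h1 hone h31 hdv]
        have hg1 : (1:Int) ≤ (10:Int)^Nat.log 10 n.toNat := by
          rw [hpowcast]
          exact_mod_cast Nat.one_le_pow _ _ (by omega)
        have hg31 : (10:Int)^Nat.log 10 n.toNat ≤ 2147483648 := by
          rw [hpowcast]; omega
        rw [ih ((10:Int)^Nat.log 10 n.toNat) f1 f2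
          (total + min (n - (10:Int)^Nat.log 10 n.toNat)
            (bSpec (Nat.log 10 n.toNat + 1) 0 n.toNat))
          (by omega) hg1 hg31 (by omega) (by omega)]
        ring

-- ===== VERDICT (by name: the statement is the Claim_ definition above) =====
theorem f_spec : Claim_equal_f := by
  intro n hdom hpre
  unfold Spec_f f f_alt
  have h31 : n ≤ 2147483648 := by
    unfold Dom_f pvDomInt at hdom; simp at hdom; exact hdom.2
  have h := main_loop n.toNat n (n.toNat + 1) (n.toNat + 1) 1 le_rfl hpre h31
    (by omega) (by omega)
  omega
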